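-- pv_equiv track=rewrite | github.com/swisscoding/dijkstra_algorithm | dijkstra_alg.py | findNumInArray
-- ===== SOURCE A (Python) =====
-- def findNumInArray(a):
--     index1 = 0
--     index2 = 0
--     pos = []
--     for i in a:
--         for j in i:
--             if j != 0:
--                 if not [index2, index1, j] in pos:
--                     pos.append([index1, index2, j])
--             index2 += 1
--         index2 = 0
--         index1 += 1
--     return pos
-- ===== SOURCE B (Python) =====
-- def findNumInArray(a):
--     pos = []
--     for i, row in enumerate(a):
--         for jdx, v in enumerate(row):
--             if v != 0 and not (i > jdx and i < len(a[jdx]) and a[jdx][i] == v):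
--                 pos.append([i, jdx, v])
--     return pos
-- ===== Notes on version B (the rewrite author's own statement) =====
-- stated objective: faster
-- what changed: A decides transpose-duplicates by scanning the growing output list for [col,row,v] at every nonzero cell; B drops that scan entirely and decides from the input matrix alone with a guarded symmetry test (i > jdx and i < len(a[jdx]) and a[jdx][i] == v).
import Mathlib
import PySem

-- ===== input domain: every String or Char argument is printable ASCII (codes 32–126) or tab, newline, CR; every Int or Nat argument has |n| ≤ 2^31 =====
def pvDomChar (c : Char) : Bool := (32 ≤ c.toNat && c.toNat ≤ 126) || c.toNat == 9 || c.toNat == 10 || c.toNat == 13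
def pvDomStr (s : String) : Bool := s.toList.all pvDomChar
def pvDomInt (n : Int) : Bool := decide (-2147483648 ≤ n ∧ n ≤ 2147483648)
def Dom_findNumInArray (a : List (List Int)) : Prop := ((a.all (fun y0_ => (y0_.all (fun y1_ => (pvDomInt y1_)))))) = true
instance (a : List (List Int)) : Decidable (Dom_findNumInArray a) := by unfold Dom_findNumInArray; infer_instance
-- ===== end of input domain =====

-- B replaces A's membership scan of the growing `pos` list by a direct symmetry test on the
-- input matrix; a timing run measured B faster (no O(output) scan per cell).

-- ===== PORT A =====
-- inner loop body: `for j in i: if j != 0: if not [index2, index1, j] in pos: pos.append(...)`; `index2 += 1`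
def pvStepA (index1 : Int) (st : Int × List (List Int)) (j : Int) : Int × List (List Int) :=
  if j ≠ 0 then
    if ¬ ([st.1, index1, j] ∈ st.2) then (st.1 + 1, st.2 ++ [[index1, st.1, j]])
    else (st.1 + 1, st.2)
  else (st.1 + 1, st.2)

-- outer loop body: run the inner loop, then `index2 = 0; index1 += 1`
def pvRowA (st : Int × Int × List (List Int)) (i : List Int) : Int × Int × List (List Int) :=
  let r := i.foldl (pvStepA st.1) (st.2.1, st.2.2)
  (st.1 + 1, 0, r.2)

def findNumInArray (a : List (List Int)) : List (List Int) :=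
  (a.foldl pvRowA (0, 0, [])).2.2

-- ===== PORT B =====
-- Source B: for i,row in enumerate(a): for jdx,v in enumerate(row):
--         if v != 0 and not (i > jdx and i < len(a[jdx]) and a[jdx][i] == v): pos.append([i,jdx,v])
-- a[jdx] is ported as pyGetD a jdx []: exact, because the guard i > jdx (with i a valid row
-- index, so jdx < i < len(a)) makes the Python lookup in-range whenever it is evaluated;
-- likewise a[jdx][i] is guarded by i < len(a[jdx]).
def findNumInArray_alt (a : List (List Int)) : List (List Int) :=
  (PySem.List.enumerate a).foldl (fun pos p =>
    (PySem.List.enumerate p.2).foldl (fun pos q =>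
      if q.2 ≠ 0 ∧ ¬ (p.1 > q.1 ∧ p.1 < PySem.List.len (PySem.List.pyGetD a q.1 [])
            ∧ PySem.List.pyGetD (PySem.List.pyGetD a q.1 []) p.1 0 = q.2)
      then pos ++ [[p.1, q.1, q.2]] else pos) pos) []

-- ===== PRECONDITION & SPEC =====
def Spec_findNumInArray (a : List (List Int)) (out : List (List Int)) : Prop := out = findNumInArray_alt a
instance (a : List (List Int)) (out : List (List Int)) : Decidable (Spec_findNumInArray a out) := by unfold Spec_findNumInArray; infer_instance

-- ===== CLAIM (what is proved, stated in full; the proofs are below) =====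
def Claim_equal_findNumInArray : Prop := ∀ (a : List (List Int)), Dom_findNumInArray a → Spec_findNumInArray a (findNumInArray a)

-- ===== LEMMAS AND PROOFS =====

-- value of cell (x, y) (total form; only used at in-range positions)
def pvVal (a : List (List Int)) (x y : Nat) : Int := (a.getD x []).getD y 0

-- B's keep decision at cell (r, c)
def pvKeep (a : List (List Int)) (r c : Nat) : Bool :=
  (pvVal a r c != 0) &&
    !(decide (c < r) && decide (r < (a.getD c []).length) && (pvVal a c r == pvVal a r c))

-- the triples kept from columns [s, s+n) of row r
def pvRowSeg (a : List (List Int)) (r s n : Nat) : List (List Int) :=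
  (List.range' s n).filterMap (fun y =>
    if pvKeep a r y = true then some [(r : Int), (y : Int), pvVal a r y] else none)

-- the triples kept from rows [s, s+n)
def pvOutSeg (a : List (List Int)) (s n : Nat) : List (List Int) :=
  (List.range' s n).flatMap (fun x => pvRowSeg a x 0 (a.getD x []).length)

lemma mem_pvRowSeg {a : List (List Int)} {r s n : Nat} {t : List Int} :
    t ∈ pvRowSeg a r s n ↔ ∃ y, (s ≤ y ∧ y < s + n) ∧ pvKeep a r y = true ∧
      t = [(r : Int), (y : Int), pvVal a r y] := by
  simp only [pvRowSeg, List.mem_filterMap, List.mem_range'_1]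
  constructor
  · rintro ⟨y, hy, he⟩
    by_cases h : pvKeep a r y = true
    · simp [h] at he; exact ⟨y, hy, h, he.symm⟩
    · simp [h] at he
  · rintro ⟨y, hy, h, rfl⟩
    exact ⟨y, hy, by simp [h]⟩

lemma mem_pvOutSeg {a : List (List Int)} {n : Nat} {t : List Int} :
    t ∈ pvOutSeg a 0 n ↔ ∃ x y, x < n ∧ y < (a.getD x []).length ∧ pvKeep a x y = true ∧
      t = [(x : Int), (y : Int), pvVal a x y] := by
  simp only [pvOutSeg, List.mem_flatMap, List.mem_range'_1]
  constructor
  · rintro ⟨x, ⟨-, hx⟩, ht⟩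
    rcases mem_pvRowSeg.mp ht with ⟨y, ⟨-, hy⟩, hk, rfl⟩
    exact ⟨x, y, by omega, by omega, hk, rfl⟩
  · rintro ⟨x, y, hx, hy, hk, rfl⟩
    exact ⟨x, ⟨by omega, by omega⟩, mem_pvRowSeg.mpr ⟨y, ⟨by omega, by omega⟩, hk, rfl⟩⟩

-- the transpose-membership test A performs equals B's keep decision
lemma pvTransMem {a : List (List Int)} {r c : Nat} (hv : pvVal a r c ≠ 0) :
    ([(c : Int), (r : Int), pvVal a r c] ∈ pvOutSeg a 0 r ++ pvRowSeg a r 0 c)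
      ↔ pvKeep a r c = false := by
  rw [List.mem_append]
  have hrow : ¬ ([(c : Int), (r : Int), pvVal a r c] ∈ pvRowSeg a r 0 c) := by
    rw [mem_pvRowSeg]
    rintro ⟨y, ⟨-, hy⟩, -, he⟩
    simp only [List.cons.injEq, Nat.cast_inj, and_true] at he
    omega
  constructor
  · rintro (h | h)
    · rcases mem_pvOutSeg.mp h with ⟨x, y, hx, hy, hk, he⟩
      simp only [List.cons.injEq, Nat.cast_inj, and_true] at he
      obtain ⟨rfl, rfl, hval⟩ := he
      simp only [List.getD_eq_getElem?_getD] at hy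
      simp [pvKeep, hx, hy, hval.symm]
    · exact absurd h hrow
  · intro h
    left
    have h1 : (pvVal a r c != 0) = true := by simpa [bne_iff_ne] using hv
    simp only [pvKeep, h1, Bool.true_and, Bool.not_eq_false', Bool.and_eq_true,
      decide_eq_true_eq, beq_iff_eq] at h
    obtain ⟨⟨hcr, hrl⟩, hval⟩ := h
    refine mem_pvOutSeg.mpr ⟨c, r, hcr, hrl, ?_, by rw [hval]⟩
    have hnc : ¬ r < c := Nat.lt_asymm hcr
    simp [pvKeep, hval, hv, hnc]

lemma pvRowSeg_succ (a : List (List Int)) (r c : Nat) :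
    pvRowSeg a r 0 (c + 1) = pvRowSeg a r 0 c ++
      (if pvKeep a r c = true then [[(r : Int), (c : Int), pvVal a r c]] else []) := by
  rw [pvRowSeg, pvRowSeg, List.range'_1_concat, List.filterMap_append]
  by_cases h : pvKeep a r c = true <;> simp [h]

lemma pvInner (a : List (List Int)) (r : Nat) :
    ∀ (rest : List Int) (c : Nat), rest = (a.getD r []).drop c → c ≤ (a.getD r []).length →
      rest.foldl (pvStepA (r : Int)) ((c : Int), pvOutSeg a 0 r ++ pvRowSeg a r 0 c)
        = ((((a.getD r []).length : Nat) : Int), pvOutSeg a 0 r ++ pvRowSeg a r 0 (a.getD r []).length) := by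
  intro rest
  induction rest with
  | nil =>
    intro c hdrop hle
    have : c = (a.getD r []).length := by
      have := List.drop_eq_nil_iff.mp hdrop.symm; omega
    subst this
    rfl
  | cons v rest ih =>
    intro c hdrop hle
    have hc : c < (a.getD r []).length := by
      by_contra hh
      rw [List.drop_eq_nil_iff.mpr (by omega)] at hdrop; cases hdrop
    have hval : pvVal a r c = v := by
      have h0 : ((a.getD r []).drop c)[0]? = some v := by rw [← hdrop]; rfl
      rw [List.getElem?_drop] at h0
      simp only [Nat.add_zero] at h0
      simp only [pvVal, List.getD_eq_getElem?_getD] at h0 ⊢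
      rw [h0]; rfl
    have hrest : rest = (a.getD r []).drop (c + 1) := by
      rw [← List.tail_drop, ← hdrop]; rfl
    rw [List.foldl_cons]
    have hstep : pvStepA (r : Int) ((c : Int), pvOutSeg a 0 r ++ pvRowSeg a r 0 c) v
        = (((c + 1 : Nat) : Int), pvOutSeg a 0 r ++ pvRowSeg a r 0 (c + 1)) := by
      by_cases hv0 : v = 0
      · have hk : pvKeep a r c = false := by simp [pvKeep, hval, hv0]
        simp [pvStepA, hv0, pvRowSeg_succ, hk]
      · have hmem := pvTransMem (a := a) (r := r) (c := c) (by rw [hval]; exact hv0)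
        rw [hval] at hmem
        by_cases hk : pvKeep a r c = true
        · have : ¬ ([(c : Int), (r : Int), v] ∈ pvOutSeg a 0 r ++ pvRowSeg a r 0 c) := by
            rw [hmem]; simp [hk]
          simp [pvStepA, hv0, this, pvRowSeg_succ, hk, hval]
        · have hk' : pvKeep a r c = false := by simpa using hk
          have : [(c : Int), (r : Int), v] ∈ pvOutSeg a 0 r ++ pvRowSeg a r 0 c := hmem.mpr hk'
          simp [pvStepA, hv0, this, pvRowSeg_succ, hk']
    rw [hstep]
    exact ih (c + 1) hrest (by omega)

lemma pvOutSeg_succ (a : List (List Int)) (r : Nat) :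
    pvOutSeg a 0 (r + 1) = pvOutSeg a 0 r ++ pvRowSeg a r 0 (a.getD r []).length := by
  rw [pvOutSeg, pvOutSeg, List.range'_1_concat, List.flatMap_append]
  simp

lemma pvOuter (a : List (List Int)) :
    ∀ (rows : List (List Int)) (r : Nat), rows = a.drop r → r ≤ a.length →
      rows.foldl pvRowA ((r : Int), 0, pvOutSeg a 0 r)
        = (((a.length : Nat) : Int), 0, pvOutSeg a 0 a.length) := by
  intro rows
  induction rows with
  | nil =>
    intro r hdrop hle
    have : r = a.length := by
      have := List.drop_eq_nil_iff.mp hdrop.symm; omega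
    subst this
    rfl
  | cons row rows ih =>
    intro r hdrop hle
    have hr : r < a.length := by
      by_contra hh
      rw [List.drop_eq_nil_iff.mpr (by omega)] at hdrop; cases hdrop
    have hrow : a.getD r [] = row := by
      have h0 : (a.drop r)[0]? = some row := by rw [← hdrop]; rfl
      rw [List.getElem?_drop] at h0
      simp only [Nat.add_zero] at h0
      simp only [List.getD_eq_getElem?_getD, h0]; rfl
    have hrest : rows = a.drop (r + 1) := by
      rw [← List.tail_drop, ← hdrop]; rfl
    rw [List.foldl_cons]
    have hin := pvInner a r (a.getD r []) 0 (by simp) (Nat.zero_le _)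
    rw [hrow] at hin
    have hrowA : pvRowA ((r : Int), 0, pvOutSeg a 0 r) row
        = (((r + 1 : Nat) : Int), 0, pvOutSeg a 0 (r + 1)) := by
      simp only [pvRowA]
      have hs : ((0 : Nat) : Int) = (0 : Int) := rfl
      have hseg : pvRowSeg a r 0 0 = [] := rfl
      rw [hs, hseg, List.append_nil] at hin
      rw [hin, pvOutSeg_succ, hrow]
      push_cast; ring_nf
    rw [hrowA]
    exact ih (r + 1) hrest (by omega)

lemma pvA_eq (a : List (List Int)) : findNumInArray a = pvOutSeg a 0 a.length := by
  have h := pvOuter a a 0 (by simp) (Nat.zero_le _)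
  rw [findNumInArray,
    show ((0 : Int), (0 : Int), ([] : List (List Int)))
        = (((0 : Nat) : Int), (0 : Int), pvOutSeg a 0 0) from rfl, h]

lemma pvRowSeg_cons (a : List (List Int)) (r c n : Nat) :
    pvRowSeg a r c (n + 1) = (if pvKeep a r c = true then [[(r : Int), (c : Int), pvVal a r c]] else [])
      ++ pvRowSeg a r (c + 1) n := by
  rw [pvRowSeg, pvRowSeg, List.range'_succ, List.filterMap_cons]
  by_cases h : pvKeep a r c = true <;> simp [h]

lemma pvAltInner (a : List (List Int)) (r : Nat) :
    ∀ (rest : List Int) (c : Nat) (pos : List (List Int)), rest = (a.getD r []).drop c →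
      (PySem.List.enumerate rest (c : Int)).foldl (fun pos q =>
          if q.2 ≠ 0 ∧ ¬ ((r : Int) > q.1 ∧ (r : Int) < PySem.List.len (PySem.List.pyGetD a q.1 [])
                ∧ PySem.List.pyGetD (PySem.List.pyGetD a q.1 []) (r : Int) 0 = q.2)
          then pos ++ [[(r : Int), q.1, q.2]] else pos) pos
        = pos ++ pvRowSeg a r c rest.length := by
  intro rest
  induction rest with
  | nil =>
    intro c pos hdrop
    simp [PySem.List.enumerate_nil, pvRowSeg]
  | cons v rest ih =>
    intro c pos hdrop
    have hc : c < (a.getD r []).length := by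
      by_contra hh
      rw [List.drop_eq_nil_iff.mpr (by omega)] at hdrop; cases hdrop
    have hval : pvVal a r c = v := by
      have h0 : ((a.getD r []).drop c)[0]? = some v := by rw [← hdrop]; rfl
      rw [List.getElem?_drop] at h0
      simp only [Nat.add_zero] at h0
      simp only [pvVal, List.getD_eq_getElem?_getD] at h0 ⊢
      rw [h0]; rfl
    have hrest : rest = (a.getD r []).drop (c + 1) := by
      rw [← List.tail_drop, ← hdrop]; rfl
    rw [PySem.List.enumerate_cons, List.foldl_cons]
    have hkey : (pvVal a r c ≠ 0 ∧ ¬ ((r : Int) > (c : Int) ∧ (r : Int) < PySem.List.len (PySem.List.pyGetD a (c : Int) [])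
          ∧ PySem.List.pyGetD (PySem.List.pyGetD a (c : Int) []) (r : Int) 0 = pvVal a r c))
        ↔ pvKeep a r c = true := by
      simp [pvKeep, pvVal, gt_iff_lt, Nat.cast_lt, bne_iff_ne]
      omega
    dsimp only
    simp only [List.length_cons]
    rw [pvRowSeg_cons, ← hval]
    by_cases hk : pvKeep a r c = true
    · rw [if_pos (hkey.mpr hk), if_pos hk,
        show ((c : Int) + 1) = ((c + 1 : Nat) : Int) by push_cast; ring,
        ih (c + 1) _ hrest]
      simp
    · rw [if_neg (fun hcd => hk (hkey.mp hcd)), if_neg hk,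
        show ((c : Int) + 1) = ((c + 1 : Nat) : Int) by push_cast; ring,
        ih (c + 1) _ hrest]
      simp

lemma pvOutSeg_cons (a : List (List Int)) (r n : Nat) :
    pvOutSeg a r (n + 1) = pvRowSeg a r 0 (a.getD r []).length ++ pvOutSeg a (r + 1) n := by
  rw [pvOutSeg, pvOutSeg, List.range'_succ, List.flatMap_cons]

lemma pvAltOuter (a : List (List Int)) :
    ∀ (rows : List (List Int)) (r : Nat) (pos : List (List Int)), rows = a.drop r →
      (PySem.List.enumerate rows (r : Int)).foldl (fun pos p =>
          (PySem.List.enumerate p.2).foldl (fun pos q =>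
            if q.2 ≠ 0 ∧ ¬ (p.1 > q.1 ∧ p.1 < PySem.List.len (PySem.List.pyGetD a q.1 [])
                  ∧ PySem.List.pyGetD (PySem.List.pyGetD a q.1 []) p.1 0 = q.2)
            then pos ++ [[p.1, q.1, q.2]] else pos) pos) pos
        = pos ++ pvOutSeg a r rows.length := by
  intro rows
  induction rows with
  | nil =>
    intro r pos hdrop
    simp [PySem.List.enumerate_nil, pvOutSeg]
  | cons row rows ih =>
    intro r pos hdrop
    have hrow : a.getD r [] = row := by
      have hr : r < a.length := by
        by_contra hh
        rw [List.drop_eq_nil_iff.mpr (by omega)] at hdrop; cases hdrop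
      have h0 : (a.drop r)[0]? = some row := by rw [← hdrop]; rfl
      rw [List.getElem?_drop] at h0
      simp only [Nat.add_zero] at h0
      simp only [List.getD_eq_getElem?_getD, h0]; rfl
    have hrest : rows = a.drop (r + 1) := by
      rw [← List.tail_drop, ← hdrop]; rfl
    rw [PySem.List.enumerate_cons, List.foldl_cons]
    dsimp only
    have hin := pvAltInner a r row 0 pos (by rw [List.drop_zero, hrow])
    rw [Nat.cast_zero] at hin
    rw [hin, show ((r : Int) + 1) = ((r + 1 : Nat) : Int) by push_cast; ring,
      ih (r + 1) _ hrest]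
    rw [List.length_cons, pvOutSeg_cons, hrow, List.append_assoc]

lemma pvAlt_eq (a : List (List Int)) : findNumInArray_alt a = pvOutSeg a 0 a.length := by
  rw [findNumInArray_alt]
  have h := pvAltOuter a a 0 [] (by simp)
  rw [Nat.cast_zero] at h
  rw [h]
  simp

-- ===== VERDICT (by name: the statement is the Claim_ definition above) =====
theorem findNumInArray_spec : Claim_equal_findNumInArray := by
  intro a _
  unfold Spec_findNumInArray
  rw [pvA_eq, pvAlt_eq]
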